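-- pv_equiv track=rewrite | github.com/hey-simba/Bracu-CSE220-Fall2024 | Lab 01 [ Array ]/Task 02.py | discardCards
-- ===== SOURCE A (Python) =====
-- def discardCards(cards, t):
--     for i in range(len(cards)):
--         if cards[i] == None:
--             cards[i] = 0
--
--     size = 0
--
--     for i in range(len(cards)):
--         if cards[i] != 0:
--             size += 1
--         else:
--             break
--
--     counter = 1
--     i = 0
--
--     while i < size:
--         if cards[i] != t:
--             i += 1
--         else:
--             if counter % 2 == 0:
--                 i += 1
--             else:
--                 for j in range(i, size - 1):
--                     cards[j] = cards[j + 1]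
--                 cards[size - 1] = 0
--                 size -= 1
--             counter += 1
--
--     return cards
-- ===== SOURCE B (Python) =====
-- def discardCards(cards, t):
--     # One pass: keep non-t elements and even-numbered occurrences of t
--     # within the leading nonzero prefix, pad with zeros, keep the tail.
--     # (A also mutates `cards` in place; B only builds the return value.)
--     size = 0
--     while size < len(cards) and cards[size] != 0:
--         size += 1
--     kept = []
--     occ = 0
--     for x in cards[:size]:
--         if x == t:
--             occ += 1
--             if occ % 2 == 0:
--                 kept.append(x)
--         else:
--             kept.append(x)
--     return kept + [0] * (size - len(kept)) + cards[size:]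
-- ===== Notes on version B (the rewrite author's own statement) =====
-- stated objective: alternative
-- what changed: A removes each odd occurrence of t by left-shifting the remaining prefix in place and re-examining the same index; B instead makes a single pass over the leading nonzero prefix with an occurrence counter, collecting non-t elements and even occurrences, then pads with zeros and reattaches the tail (the equivalence is about the return value only: A mutates the input list in place, B does not).
import Mathlib
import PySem

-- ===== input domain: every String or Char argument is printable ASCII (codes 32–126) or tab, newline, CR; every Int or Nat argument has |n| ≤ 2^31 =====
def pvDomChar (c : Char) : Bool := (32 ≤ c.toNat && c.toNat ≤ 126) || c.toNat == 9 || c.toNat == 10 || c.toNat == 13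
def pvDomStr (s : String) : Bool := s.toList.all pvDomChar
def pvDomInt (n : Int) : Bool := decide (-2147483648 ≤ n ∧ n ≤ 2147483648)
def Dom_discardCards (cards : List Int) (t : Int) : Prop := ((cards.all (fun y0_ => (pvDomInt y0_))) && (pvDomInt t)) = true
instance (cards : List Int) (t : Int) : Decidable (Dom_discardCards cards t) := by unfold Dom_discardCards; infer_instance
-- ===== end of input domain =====

-- B replaces A's remove-by-left-shift-and-rescan loop by one pass with an occurrence counter
-- that keeps non-t elements and even occurrences of t, then pads with zeros; the equivalence
-- is about the RETURN value only (A also mutates its argument in place, B does not).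

-- ===== PORT A =====
-- Python's `cards[i] == None` is always False for ints, so the first loop rewrites nothing.
def pvA_noneLoop (cards : List Int) : List Int :=
  (List.range cards.length).foldl (fun cs _ => cs) cards

-- `for i in range(len(cards)): if cards[i] != 0: size += 1 else: break` — scan with break.
def pvA_size : List Int → Nat
  | [] => 0
  | x :: xs => if x ≠ 0 then pvA_size xs + 1 else 0

-- `for j in range(i, size-1): cards[j] = cards[j+1]` — all indices are in range here
-- (i < size ≤ len cards), so List.set / List.getD are exact for Python's cards[j] = cards[j+1].
def pvA_shift (cards : List Int) (i size : Nat) : List Int :=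
  (List.range' i (size - 1 - i)).foldl (fun cs j => cs.set j (cs.getD (j + 1) 0)) cards

-- the while loop; state = (cards, i, size, counter); terminates since size - i shrinks.
def pvA_while (t : Int) (cards : List Int) (i size : Nat) (counter : Int) : List Int :=
  if _h : i < size then
    if cards.getD i 0 ≠ t then
      pvA_while t cards (i + 1) size counter
    else if counter % 2 == 0 then
      pvA_while t cards (i + 1) size (counter + 1)
    else
      pvA_while t ((pvA_shift cards i size).set (size - 1) 0) i (size - 1) (counter + 1)
  else cards
termination_by size - i
decreasing_by all_goals omega

def discardCards (cards : List Int) (t : Int) : List Int :=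
  let cards1 := pvA_noneLoop cards
  let size := pvA_size cards1
  pvA_while t cards1 0 size 1

-- ===== PORT B =====
-- `while size < len(cards) and cards[size] != 0: size += 1`
def pvB_size : List Int → Nat
  | [] => 0
  | x :: xs => if x ≠ 0 then pvB_size xs + 1 else 0

-- the single pass over cards[:size] with (kept, occ)
def pvB_fold (t : Int) (pref : List Int) : List Int × Int :=
  pref.foldl
    (fun acc x =>
      if x = t then
        if (acc.2 + 1) % 2 == 0 then (acc.1 ++ [x], acc.2 + 1) else (acc.1, acc.2 + 1)
      else (acc.1 ++ [x], acc.2))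
    ([], 0)

def discardCards_alt (cards : List Int) (t : Int) : List Int :=
  let size := pvB_size cards
  let kept := (pvB_fold t (cards.take size)).1
  kept ++ List.replicate (size - kept.length) 0 ++ cards.drop size

-- ===== PRECONDITION & SPEC =====
def Spec_discardCards (cards : List Int) (t : Int) (out : List Int) : Prop := out = discardCards_alt cards t
instance (cards : List Int) (t : Int) (out : List Int) : Decidable (Spec_discardCards cards t out) := by unfold Spec_discardCards; infer_instance

-- ===== CLAIM (what is proved, stated in full; the proofs are below) =====
def Claim_equal_discardCards : Prop := ∀ (cards : List Int) (t : Int), Dom_discardCards cards t → Spec_discardCards cards t (discardCards cards t)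

-- ===== LEMMAS AND PROOFS =====

-- the common specification: keep non-t elements and occurrences of t with even counter
def pvGo (t : Int) : List Int → Int → List Int
  | [], _ => []
  | x :: xs, c =>
    if x ≠ t then x :: pvGo t xs c
    else if c % 2 == 0 then x :: pvGo t xs (c + 1)
    else pvGo t xs (c + 1)

theorem pvGo_length (t : Int) (l : List Int) : ∀ c : Int, (pvGo t l c).length ≤ l.length := by
  induction l with
  | nil => intro c; exact Nat.le_refl 0
  | cons y ys ih =>
    intro c
    simp only [pvGo, List.length_cons]
    split_ifs
    · exact Nat.succ_le_succ (ih c)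
    · exact Nat.succ_le_succ (ih _)
    · exact Nat.le_succ_of_le (ih _)

theorem pvA_noneLoop_eq (cards : List Int) : pvA_noneLoop cards = cards := by
  unfold pvA_noneLoop
  induction List.range cards.length with
  | nil => rfl
  | cons a l ih => simpa using ih

theorem pv_getD_mid (pre tail : List Int) (x : Int) (n : Nat) (h : n = pre.length) :
    (pre ++ x :: tail).getD n 0 = x := by
  subst h; simp [List.getD]

theorem pvA_shift_spec (xs : List Int) : ∀ (pre tail : List Int) (x : Int),
    ((pvA_shift (pre ++ x :: (xs ++ tail)) pre.length (pre.length + xs.length + 1)).set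
      (pre.length + xs.length) 0) = pre ++ xs ++ 0 :: tail := by
  induction xs with
  | nil =>
    intro pre tail x
    simp [pvA_shift]
  | cons y ys ih =>
    intro pre tail x
    have hlen : pre.length + (y :: ys).length + 1 - 1 - pre.length = ys.length + 1 := by
      simp only [List.length_cons]; omega
    have hget : (pre ++ x :: (y :: ys ++ tail)).getD (pre.length + 1) 0 = y := by
      have h3 : pre ++ x :: (y :: ys ++ tail) = (pre ++ [x]) ++ y :: (ys ++ tail) := by simp
      rw [h3, pv_getD_mid _ _ _ _ (by simp)]
    have hset : (pre ++ x :: (y :: ys ++ tail)).set pre.length y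
        = (pre ++ [y]) ++ y :: (ys ++ tail) := by
      rw [List.set_append_right _ _ (by omega)]
      simp
    unfold pvA_shift
    rw [hlen, List.range'_succ, List.foldl_cons, hget, hset]
    have := ih (pre ++ [y]) tail y
    unfold pvA_shift at this
    have hl : (pre ++ [y]).length = pre.length + 1 := by simp
    have hl2 : pre.length + (y :: ys).length + 1 - 1 - pre.length = ys.length + 1 := hlen
    -- rewrite index arithmetic to match ih
    have harith1 : (pre ++ [y]).length + ys.length + 1 - 1 - (pre ++ [y]).length = ys.length := by
      simp
    rw [hl] at this
    have : ((List.range' (pre.length + 1) ys.length).foldl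
          (fun cs j => cs.set j (cs.getD (j + 1) 0)) ((pre ++ [y]) ++ y :: (ys ++ tail))).set
          (pre.length + 1 + ys.length) 0 = (pre ++ [y]) ++ ys ++ 0 :: tail := by
      simpa [harith1] using this
    have hidx : pre.length + (y :: ys).length = pre.length + 1 + ys.length := by
      simp only [List.length_cons]; omega
    rw [hidx]
    rw [this]
    simp

theorem pvA_while_spec (t : Int) (rest : List Int) : ∀ (pre tail : List Int) (c : Int),
    pvA_while t (pre ++ rest ++ tail) pre.length (pre.length + rest.length) c
      = pre ++ pvGo t rest c ++ List.replicate (rest.length - (pvGo t rest c).length) 0 ++ tail := by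
  induction rest with
  | nil =>
    intro pre tail c
    rw [pvA_while]
    simp [pvGo]
  | cons x xs ih =>
    intro pre tail c
    have hget : (pre ++ (x :: xs) ++ tail).getD pre.length 0 = x := by
      rw [List.append_assoc, List.cons_append, pv_getD_mid _ _ _ _ rfl]
    rw [pvA_while]
    have hlt : pre.length < pre.length + (x :: xs).length := by simp
    rw [dif_pos hlt, hget]
    by_cases hx : x = t
    · rw [if_neg (by simpa using hx)]
      by_cases hc : c % 2 == 0
      · -- even counter: keep x, advance i
        rw [if_pos hc]
        have := ih (pre ++ [x]) tail (c + 1)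
        have h1 : (pre ++ [x]).length = pre.length + 1 := by simp
        rw [h1] at this
        have h2 : pre.length + 1 + xs.length = pre.length + (x :: xs).length := by
          simp only [List.length_cons]; omega
        rw [h2] at this
        have h3 : (pre ++ [x]) ++ xs ++ tail = pre ++ (x :: xs) ++ tail := by simp
        rw [h3] at this
        rw [this]
        simp [pvGo, hx, hc]
      · -- odd counter: remove x by shifting
        rw [if_neg hc]
        have hshift := pvA_shift_spec xs pre tail x
        have hsz : pre.length + (x :: xs).length = pre.length + xs.length + 1 := by
          simp only [List.length_cons]; omega
        have hsz1 : pre.length + (x :: xs).length - 1 = pre.length + xs.length := by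
          simp only [List.length_cons]; omega
        have hre : pre ++ (x :: xs) ++ tail = pre ++ x :: (xs ++ tail) := by simp
        rw [hre] at *
        rw [hsz1]
        rw [show pvA_shift (pre ++ x :: (xs ++ tail)) pre.length (pre.length + (x :: xs).length)
              = pvA_shift (pre ++ x :: (xs ++ tail)) pre.length (pre.length + xs.length + 1) by rw [hsz]]
        rw [hshift]
        have := ih pre (0 :: tail) (c + 1)
        have h4 : pre ++ xs ++ 0 :: tail = pre ++ xs ++ (0 :: tail) := by simp
        rw [h4, this]
        have hle : (pvGo t xs (c + 1)).length ≤ xs.length := pvGo_length t xs (c + 1)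
        simp [pvGo, hx, hc]
        rw [show xs.length + 1 - (pvGo t xs (c + 1)).length
              = (xs.length - (pvGo t xs (c + 1)).length) + 1 by omega]
        simp [List.replicate_succ']
    · rw [if_pos (by simpa using hx)]
      have := ih (pre ++ [x]) tail c
      have h1 : (pre ++ [x]).length = pre.length + 1 := by simp
      rw [h1] at this
      have h2 : pre.length + 1 + xs.length = pre.length + (x :: xs).length := by
        simp only [List.length_cons]; omega
      rw [h2] at this
      have h3 : (pre ++ [x]) ++ xs ++ tail = pre ++ (x :: xs) ++ tail := by simp
      rw [h3] at this
      rw [this]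
      simp [pvGo, hx]

theorem pvB_fold_spec (t : Int) (xs : List Int) : ∀ (ks : List Int) (occ : Int),
    xs.foldl
      (fun acc x =>
        if x = t then
          if (acc.2 + 1) % 2 == 0 then (acc.1 ++ [x], acc.2 + 1) else (acc.1, acc.2 + 1)
        else (acc.1 ++ [x], acc.2))
      (ks, occ)
      = (ks ++ pvGo t xs (occ + 1), occ + xs.count t) := by
  induction xs with
  | nil => intro ks occ; simp [pvGo]
  | cons x rest ih =>
    intro ks occ
    simp only [List.foldl_cons]
    by_cases hx : x = t
    · subst hx
      by_cases hc : (occ + 1) % 2 == 0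
      · rw [if_pos rfl, if_pos hc, ih]
        simp [pvGo, hc]
        omega
      · rw [if_pos rfl, if_neg hc, ih]
        simp [pvGo, hc]
        omega
    · rw [if_neg hx, ih]
      simp [pvGo, hx]

theorem pvB_size_le (cards : List Int) : pvB_size cards ≤ cards.length := by
  induction cards with
  | nil => simp [pvB_size]
  | cons x xs ih => by_cases h : x = 0 <;> simp [pvB_size, h] <;> omega

-- ===== VERDICT (by name: the statement is the Claim_ definition above) =====
theorem pv_size_eq (cards : List Int) : pvA_size cards = pvB_size cards := by
  induction cards with
  | nil => rfl
  | cons x xs ih => simp [pvA_size, pvB_size, ih]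

theorem discardCards_spec : Claim_equal_discardCards := by
  intro cards t _
  unfold Spec_discardCards discardCards discardCards_alt
  simp only [pvA_noneLoop_eq, pv_size_eq]
  set sz := pvB_size cards with hsz
  have hle : sz ≤ cards.length := pvB_size_le cards
  have hsplit : cards = cards.take sz ++ cards.drop sz := by simp
  have hlen : (cards.take sz).length = sz := by simp [hle]
  have hA := pvA_while_spec t (cards.take sz) [] (cards.drop sz) 1
  simp only [List.nil_append, List.length_nil, Nat.zero_add] at hA
  rw [hlen] at hA
  rw [← hsplit] at hA
  rw [hA]
  have hfold := pvB_fold_spec t (cards.take sz) [] 0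
  unfold pvB_fold
  rw [hfold]
  simp
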